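-- pv_equiv track=rewrite | github.com/kkafar/algo | algorytmy/min_max_value.py | min_max_value
-- ===== SOURCE A (Python) =====
-- def min_max_value(array):
-- 	""" Jednoczesne wyszukiwanie min i max.
-- 		Zwraca krotkę: (min_value, max_value) """
-- 	#######################################################
-- 	# do algorytmu jednoczesnego wyszukiwania min i max potrzebujemy mieć parzystą ilość elementów w tablicy
-- 	# ==> jeżeli jest nieparzysta to powielamy ostatni element. Potem go usuniemy ( w tym celu ustawiamy flagę - żeby widzieć czy usuwać)
--
-- 	# jeszcze jest problem z reprezentowaniem nieskończonośći: roboczo zróbmy to tak: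
-- 	min_value = 100000000
-- 	max_value = -100000000
--
-- 	flag = False
-- 	if len(array) % 2 == 1:
-- 		array.append(array[-1])
-- 		flag = True
--
-- 	# iterujemy z krokiem 2
-- 	for i in range(0, len(array), 2):
-- 		if array[i] > array[i + 1]:
-- 			# to array[i] jest potencjalnym kandydatem na max_value,
-- 			# natomiast array[i + 1] jest potencjalnym kandydatem na min_value
-- 			if array[i] > max_value:
-- 				max_value = array[i]
-- 			if array[i + 1] < min_value:
-- 				min_value = array[i + 1]
-- 		else:
-- 			if array[i] < min_value:
-- 				min_value = array[i]
-- 			if array[i + 1] > max_value: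
-- 				max_value = array[i + 1]
--
-- 	if flag == True:
-- 		array.pop()
--
-- 	return (min_value, max_value)
-- ===== SOURCE B (Python) =====
-- def min_max_value(array):
-- 	""" Jednoczesne wyszukiwanie min i max.
-- 		Zwraca krotkę: (min_value, max_value) """
-- 	# single naive elementwise pass, same sentinel "infinities" as A
-- 	min_value = 100000000
-- 	max_value = -100000000
-- 	for x in array:
-- 		if x < min_value:
-- 			min_value = x
-- 		if x > max_value:
-- 			max_value = x
-- 	return (min_value, max_value)
-- ===== Notes on version B (the rewrite author's own statement) =====
-- stated objective: simpler
-- what changed: Replaces A's even-padding (append/pop of the last element) and step-2 pairwise-comparison loop over indices by a plain elementwise scan that updates min and max per element with the same sentinel bounds.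
import Mathlib
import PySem

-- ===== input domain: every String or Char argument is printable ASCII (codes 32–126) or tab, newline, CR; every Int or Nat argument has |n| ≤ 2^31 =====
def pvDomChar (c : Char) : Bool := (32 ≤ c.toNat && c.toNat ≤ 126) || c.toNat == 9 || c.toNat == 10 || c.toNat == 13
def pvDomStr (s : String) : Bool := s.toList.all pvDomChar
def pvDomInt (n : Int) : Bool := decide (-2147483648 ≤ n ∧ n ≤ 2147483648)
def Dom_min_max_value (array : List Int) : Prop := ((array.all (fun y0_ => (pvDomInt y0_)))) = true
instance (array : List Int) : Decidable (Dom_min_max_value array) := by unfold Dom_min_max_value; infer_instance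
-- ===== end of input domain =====

-- B replaces A's even-padding (append/pop) and step-2 pairwise loop by a plain elementwise
-- min/max scan with the same sentinel bounds; return value only (A's append/pop is net-neutral).


-- ===== PORT A =====
-- the step-2 loop over indices i, i+1: structural recursion consuming two elements at a time
def pvPairLoop : List Int → Int → Int → Int × Int
  | [], min_value, max_value => (min_value, max_value)
  | [_], min_value, max_value => (min_value, max_value)  -- unreachable: list has even length
  | a :: b :: rest, min_value, max_value =>
    if a > b then
      pvPairLoop rest (if b < min_value then b else min_value)
                      (if a > max_value then a else max_value)
    else
      pvPairLoop rest (if a < min_value then a else min_value)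
                      (if b > max_value then b else max_value)

def min_max_value (array : List Int) : Int × Int :=
  -- if len(array) % 2 == 1: array.append(array[-1])  (popped again before return)
  let arr := if array.length % 2 = 1
             then array ++ [(PySem.List.pyGet? array (-1)).getD 0]
             else array
  pvPairLoop arr 100000000 (-100000000)

-- ===== PORT B =====
def pvStep (s : Int × Int) (x : Int) : Int × Int :=
  (if x < s.1 then x else s.1, if x > s.2 then x else s.2)

def min_max_value_alt (array : List Int) : Int × Int :=
  array.foldl pvStep (100000000, -100000000)

-- ===== PRECONDITION & SPEC =====
def Spec_min_max_value (array : List Int) (out : Int × Int) : Prop := out = min_max_value_alt array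
instance (array : List Int) (out : Int × Int) : Decidable (Spec_min_max_value array out) := by unfold Spec_min_max_value; infer_instance

-- ===== CLAIM (what is proved, stated in full; the proofs are below) =====
def Claim_equal_min_max_value : Prop := ∀ (array : List Int), Dom_min_max_value array → Spec_min_max_value array (min_max_value array)

-- ===== LEMMAS AND PROOFS =====

-- one pairwise step of A equals two elementwise steps of B
theorem pvStep_pair (a b : Int) (s : Int × Int) :
    pvStep (pvStep s a) b =
      if a > b then (if b < s.1 then b else s.1, if a > s.2 then a else s.2)
      else (if a < s.1 then a else s.1, if b > s.2 then b else s.2) := by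
  simp only [pvStep]
  split_ifs <;> simp_all <;> omega

-- on even-length lists the pairwise loop is B's fold
theorem pvPairLoop_eq_foldl : ∀ (l : List Int), l.length % 2 = 0 → ∀ (mn mx : Int),
    pvPairLoop l mn mx = l.foldl pvStep (mn, mx)
  | [], _, mn, mx => by simp [pvPairLoop]
  | [_], h, _, _ => by simp at h
  | a :: b :: rest, h, mn, mx => by
      have ih := pvPairLoop_eq_foldl rest (by simp only [List.length_cons] at h; omega)
      simp only [pvPairLoop, List.foldl_cons, pvStep_pair]
      by_cases hab : a > b
      · rw [if_pos hab, if_pos hab, ih]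
      · rw [if_neg hab, if_neg hab, ih]

-- the fold's min component only decreases / max only increases, and bounds every member
theorem pvFold_bounds (l : List Int) (s : Int × Int) (x : Int) (hx : x ∈ l) :
    (l.foldl pvStep s).1 ≤ x ∧ x ≤ (l.foldl pvStep s).2 := by
  induction l generalizing s with
  | nil => cases hx
  | cons y ys ih =>
      have mono : ∀ (t : Int × Int) (m : List Int),
          (m.foldl pvStep t).1 ≤ t.1 ∧ t.2 ≤ (m.foldl pvStep t).2 := by
        intro t m
        induction m generalizing t with
        | nil => exact ⟨le_refl _, le_refl _⟩
        | cons z zs ihm =>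
            have h2 := ihm (pvStep t z)
            constructor
            · exact le_trans h2.1 (by simp [pvStep]; split_ifs <;> omega)
            · exact le_trans (by simp [pvStep]; split_ifs <;> omega) h2.2
      cases hx with
      | head =>
          have h2 := mono (pvStep s x) ys
          refine ⟨le_trans h2.1 ?_, le_trans ?_ h2.2⟩ <;>
            (simp [pvStep]; split_ifs <;> omega)
      | tail _ hx => exact ih _ hx

-- re-processing an element already in the list is a no-op
theorem pvFold_dup (l : List Int) (s : Int × Int) (x : Int) (hx : x ∈ l) :
    (l ++ [x]).foldl pvStep s = l.foldl pvStep s := by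
  have hb := pvFold_bounds l s x hx
  simp only [List.foldl_append, List.foldl_cons, List.foldl_nil, pvStep]
  have h1 : ¬ x < (l.foldl pvStep s).1 := by omega
  have h2 : ¬ x > (l.foldl pvStep s).2 := by omega
  simp [h1, h2]

-- ===== VERDICT (by name: the statement is the Claim_ definition above) =====
theorem min_max_value_spec : Claim_equal_min_max_value := by
  intro array _
  unfold Spec_min_max_value min_max_value min_max_value_alt
  by_cases hodd : array.length % 2 = 1
  · have hne : array ≠ [] := by
      intro h; rw [h] at hodd; simp at hodd
    have hlast : PySem.List.pyGet? array (-1) = some (array.getLast hne) := by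
      rw [PySem.List.pyGet?_neg_one, List.getLast?_eq_getLast_of_ne_nil hne]
    simp only [hodd, hlast, Option.getD_some]
    rw [pvPairLoop_eq_foldl _ (by simp [List.length_append]; omega)]
    exact pvFold_dup _ _ _ (List.getLast_mem hne)
  · simp only [if_neg hodd]
    exact pvPairLoop_eq_foldl _ (by omega) _ _
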